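-- pv_equiv track=rewrite | github.com/hitachinsk/THA | scripts/active_counter_iteration.py | determine_center_plane_coordinate_new
-- ===== SOURCE A (Python) =====
-- def determine_center_plane_coordinate_new(chs, cws, indices, ups):
--     assert len(chs) == len(cws) == len(indices)
--     new_chs = []
--     for i in range(len(chs)):
--         idx = indices[i]
--         left_up = ups[idx]
--         ch = chs[idx]
--         ch = ch + left_up
--         new_chs.append(ch)
--
--     # Count the mode by combining the considering of x and y axis
--     coords_stats = {}
--     max_key, max_occurs = None, 0
--     for i in range(len(new_chs)):
--         key = f'{new_chs[i]}_{cws[i]}'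
--         if not key in coords_stats:
--             coords_stats[key] = 1
--             if max_key is None:
--                 max_key = key
--                 max_occurs = 1
--         else:
--             coords_stats[key] += 1
--             if coords_stats[key] > max_occurs:
--                 max_occurs = coords_stats[key]
--                 max_key = key
--     center_ch, center_cw = int(max_key.split('_')[0]), int(max_key.split('_')[1])
--
--     return center_ch, center_cw
-- ===== SOURCE B (Python) =====
-- def determine_center_plane_coordinate_new(chs, cws, indices, ups):
--     assert len(chs) == len(cws) == len(indices)
--     # one pass: build all keys; full count table
--     keys = []
--     counts = {}
--     for i in range(len(indices)):
--         idx = indices[i]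
--         key = f'{chs[idx] + ups[idx]}_{cws[i]}'
--         keys.append(key)
--         counts[key] = counts.get(key, 0) + 1
--     m = max(counts.values())
--     # second pass: the FIRST key whose running count reaches the global maximum
--     winner = None
--     running = {}
--     for key in keys:
--         running[key] = running.get(key, 0) + 1
--         if running[key] == m:
--             winner = key
--             break
--     return int(winner.split('_')[0]), int(winner.split('_')[1])
-- ===== Notes on version B (the rewrite author's own statement) =====
-- stated objective: alternative
-- what changed: A's single pass that threads a dict, a running max and an in-loop tie-break is decomposed into two passes: build the key list plus a full count table and take its explicit maximum, then rescan the keys and pick the first whose running count reaches that maximum (reproducing A's 'first to attain the max' tie-break exactly).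
import Mathlib
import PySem

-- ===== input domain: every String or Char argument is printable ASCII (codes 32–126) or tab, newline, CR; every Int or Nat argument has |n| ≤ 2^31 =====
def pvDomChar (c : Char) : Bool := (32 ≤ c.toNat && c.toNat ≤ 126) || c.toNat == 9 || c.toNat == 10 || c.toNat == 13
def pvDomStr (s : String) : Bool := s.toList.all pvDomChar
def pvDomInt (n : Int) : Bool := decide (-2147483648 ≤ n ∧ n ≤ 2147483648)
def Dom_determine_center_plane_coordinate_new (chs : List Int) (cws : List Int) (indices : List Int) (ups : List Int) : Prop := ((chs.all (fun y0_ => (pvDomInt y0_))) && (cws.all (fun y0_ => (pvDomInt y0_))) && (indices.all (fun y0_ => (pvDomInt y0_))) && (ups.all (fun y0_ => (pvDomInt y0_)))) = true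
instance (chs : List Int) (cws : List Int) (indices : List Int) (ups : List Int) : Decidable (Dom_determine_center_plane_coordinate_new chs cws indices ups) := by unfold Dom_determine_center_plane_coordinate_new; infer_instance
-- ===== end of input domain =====

-- B replaces A's single-pass "running maximum with in-place tie-break" by a two-pass decomposition
-- (full count table + explicit max, then first key whose running count reaches it); objective: alternative.
-- ===== PORT A =====
-- one loop iteration of A's counting loop (dict of counts, current max key, current max count)
def pvStepA (s : PySem.Dict (List Char) Int × Option (List Char) × Int) (key : List Char) :
    PySem.Dict (List Char) Int × Option (List Char) × Int :=
  if s.1.contains key = false then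
    let stats := s.1.insert key 1
    match s.2.1 with
    | none => (stats, some key, 1)
    | some _ => (stats, s.2.1, s.2.2)
  else
    let c := s.1.getD key 0 + 1
    let stats := s.1.insert key c
    if c > s.2.2 then (stats, some key, c) else (stats, s.2.1, s.2.2)

def determine_center_plane_coordinate_new (chs : List Int) (cws : List Int) (indices : List Int) (ups : List Int) : Int × Int :=
  let new_chs := (PySem.List.pyRange 0 (chs.length : Int)).foldl
    (fun acc i =>
      let idx := PySem.List.pyGetD indices i 0          -- in range under Pre_
      let left_up := PySem.List.pyGetD ups idx 0        -- in range under Pre_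
      let ch := PySem.List.pyGetD chs idx 0             -- in range under Pre_
      acc ++ [ch + left_up]) []
  let st := (PySem.List.pyRange 0 (new_chs.length : Int)).foldl
    (fun s i => pvStepA s
      (PySem.Int.toChars (PySem.List.pyGetD new_chs i 0) ++ '_' :: PySem.Int.toChars (PySem.List.pyGetD cws i 0)))
    (PySem.Dict.empty, none, 0)
  match st.2.1 with
  | none => (0, 0)  -- unreachable under Pre_: on empty input Python raises AttributeError
  | some k =>
      ((PySem.Int.ofChars? (PySem.List.pyGetD (PySem.Chars.splitOn k ['_']) 0 [])).getD 0,
       (PySem.Int.ofChars? (PySem.List.pyGetD (PySem.Chars.splitOn k ['_']) 1 [])).getD 0)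

-- ===== PORT B =====
-- Source B's second loop: first key whose running count reaches m (break), with the running dict
def pvWinner (m : Int) : List (List Char) → PySem.Dict (List Char) Int → Option (List Char)
  | [], _ => none
  | key :: rest, running =>
    let running' := running.modify key 0 (· + 1)
    if running'.getD key 0 = m then some key else pvWinner m rest running'

def determine_center_plane_coordinate_new_alt (chs : List Int) (cws : List Int) (indices : List Int) (ups : List Int) : Int × Int :=
  let pc := (PySem.List.pyRange 0 (indices.length : Int)).foldl
    (fun (s : List (List Char) × PySem.Dict (List Char) Int) i =>
      let idx := PySem.List.pyGetD indices i 0          -- in range under Pre_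
      let key := PySem.Int.toChars (PySem.List.pyGetD chs idx 0 + PySem.List.pyGetD ups idx 0)
                   ++ '_' :: PySem.Int.toChars (PySem.List.pyGetD cws i 0)
      (s.1 ++ [key], s.2.modify key 0 (· + 1)))
    ([], PySem.Dict.empty)
  let m := (PySem.List.max? pc.2.values (fun v => v)).getD 0  -- nonempty under Pre_: Python max() raises on empty
  match pvWinner m pc.1 PySem.Dict.empty with
  | none => (0, 0)  -- unreachable under Pre_: some key reaches the maximum count
  | some k =>
      ((PySem.Int.ofChars? (PySem.List.pyGetD (PySem.Chars.splitOn k ['_']) 0 [])).getD 0,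
       (PySem.Int.ofChars? (PySem.List.pyGetD (PySem.Chars.splitOn k ['_']) 1 [])).getD 0)

-- ===== PRECONDITION & SPEC =====
-- Pre_ = exactly where Python A returns: the assert holds, the input is nonempty (else
-- `None.split` raises AttributeError), and every index is a valid (possibly negative)
-- Python index into both ups and chs (else IndexError).
def Pre_determine_center_plane_coordinate_new (chs : List Int) (cws : List Int) (indices : List Int) (ups : List Int) : Prop :=
  chs.length = cws.length ∧ cws.length = indices.length ∧ chs ≠ [] ∧
  ∀ idx ∈ indices, (-(ups.length : Int) ≤ idx ∧ idx < (ups.length : Int)) ∧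
                   (-(chs.length : Int) ≤ idx ∧ idx < (chs.length : Int))
instance (chs : List Int) (cws : List Int) (indices : List Int) (ups : List Int) : Decidable (Pre_determine_center_plane_coordinate_new chs cws indices ups) := by unfold Pre_determine_center_plane_coordinate_new; infer_instance

def pvWitness_determine_center_plane_coordinate_new : List Int × List Int × List Int × List Int :=
  ([3, 5], [1, 1], [0, 1], [2, -1])

def Spec_determine_center_plane_coordinate_new (chs : List Int) (cws : List Int) (indices : List Int) (ups : List Int) (out : Int × Int) : Prop := out = determine_center_plane_coordinate_new_alt chs cws indices ups
instance (chs : List Int) (cws : List Int) (indices : List Int) (ups : List Int) (out : Int × Int) : Decidable (Spec_determine_center_plane_coordinate_new chs cws indices ups out) := by unfold Spec_determine_center_plane_coordinate_new; infer_instance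

-- ===== CLAIM (what is proved, stated in full; the proofs are below) =====
def Claim_equal_determine_center_plane_coordinate_new : Prop := ∀ (chs : List Int) (cws : List Int) (indices : List Int) (ups : List Int), Dom_determine_center_plane_coordinate_new chs cws indices ups → Pre_determine_center_plane_coordinate_new chs cws indices ups → Spec_determine_center_plane_coordinate_new chs cws indices ups (determine_center_plane_coordinate_new chs cws indices ups)

-- ===== LEMMAS AND PROOFS =====

-- if pvWinner returns w for target m, then m is at most w's total running count
lemma pvWinner_le (m : Int) (ks : List (List Char)) :
    ∀ (d : PySem.Dict (List Char) Int) (w : List Char),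
      pvWinner m ks d = some w → m ≤ d.getD w 0 + (ks.count w : Int) := by
  induction ks with
  | nil => intro d w h; simp [pvWinner] at h
  | cons k rest ih =>
    intro d w h
    simp only [pvWinner] at h
    by_cases hc : (d.modify k 0 (· + 1)).getD k 0 = m
    · rw [if_pos hc] at h
      obtain rfl : k = w := by injection h
      rw [PySem.Dict.getD_modify] at hc
      
      have h1 : 1 ≤ (List.count k (k :: rest) : Int) := by
        have : 1 ≤ List.count k (k :: rest) := by
          simp
        exact_mod_cast this
      omega
    · rw [if_neg hc] at h
      have := ih _ _ h
      rw [PySem.Dict.getD_modify] at this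
      by_cases hw : w = k
      · subst hw
        
        have hcnt : List.count w (w :: rest) = List.count w rest + 1 := by
          simp
        rw [hcnt]; push_cast; omega
      · simp only [if_neg hw] at this
        have hcnt : List.count w (k :: rest) = List.count w rest := by
          simp [Ne.symm hw]
        rw [hcnt]; omega

-- scanning an appended list: if the first part yields a winner it stands, otherwise
-- the scan continues with the running dict accumulated over the first part
lemma pvWinner_append (m : Int) (ks₂ : List (List Char)) : ∀ (ks₁ : List (List Char)) (d : PySem.Dict (List Char) Int),
    pvWinner m (ks₁ ++ ks₂) d =
      match pvWinner m ks₁ d with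
      | some w => some w
      | none => pvWinner m ks₂ (ks₁.foldl (fun d k => d.modify k 0 (· + 1)) d) := by
  intro ks₁
  induction ks₁ with
  | nil => intro d; simp [pvWinner]
  | cons k rest ih =>
    intro d
    simp only [List.cons_append, pvWinner, List.foldl_cons]
    by_cases hc : (d.modify k 0 (· + 1)).getD k 0 = m
    · simp [hc]
    · simp only [if_neg hc]
      exact ih _

-- the invariant of A's single counting loop: the dict holds the exact counts, the tracked
-- maximum is the maximal count, and the tracked key is exactly B's "first to reach the max"

lemma pv_getD_insert_count (d : PySem.Dict (List Char) Int) (l : List (List Char)) (k : List Char)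
    (v : Int) (hC : ∀ k', d.getD k' 0 = (l.count k' : Int)) (hv : v = (l.count k : Int) + 1) :
    ∀ k', (d.insert k v).getD k' 0 = (((l ++ [k]).count k' : Nat) : Int) := by
  intro k'
  rw [PySem.Dict.getD_insert]
  by_cases hk : k' = k
  · subst hk; rw [hv]; push_cast [List.count_append]; simp
  · rw [if_neg hk, hC k']
    have hc : List.count k' (l ++ [k]) = List.count k' l := by
      simp [List.count_append, Ne.symm hk]
    rw [hc]

lemma pv_mem_insert (d : PySem.Dict (List Char) Int) (l : List (List Char)) (k : List Char)
    (v : Int) (hM : ∀ k', d.contains k' = true ↔ k' ∈ l) :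
    ∀ k', (d.insert k v).contains k' = true ↔ k' ∈ l ++ [k] := by
  intro k'
  rw [PySem.Dict.contains_iff_mem_keys, PySem.Dict.mem_keys_insert]
  constructor
  · rintro (h | h)
    · subst h; simp
    · exact List.mem_append.2 (Or.inl ((hM k').1 ((PySem.Dict.contains_iff_mem_keys _ _).2 h)))
  · intro h
    rcases List.mem_append.1 h with h | h
    · exact Or.inr ((PySem.Dict.contains_iff_mem_keys _ _).1 ((hM k').2 h))
    · simp at h; exact Or.inl h

lemma pvA_inv (ks : List (List Char)) (hne : ks ≠ []) :
    (∀ k, (ks.foldl pvStepA (PySem.Dict.empty, none, 0)).1.getD k 0 = (ks.count k : Int)) ∧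
    (∀ k, (ks.foldl pvStepA (PySem.Dict.empty, none, 0)).1.contains k = true ↔ k ∈ ks) ∧
    (∀ k ∈ ks, (ks.count k : Int) ≤ (ks.foldl pvStepA (PySem.Dict.empty, none, 0)).2.2) ∧
    (∃ k ∈ ks, (ks.count k : Int) = (ks.foldl pvStepA (PySem.Dict.empty, none, 0)).2.2) ∧
    (ks.foldl pvStepA (PySem.Dict.empty, none, 0)).2.1 =
      pvWinner (ks.foldl pvStepA (PySem.Dict.empty, none, 0)).2.2 ks PySem.Dict.empty ∧
    ((ks.foldl pvStepA (PySem.Dict.empty, none, 0)).2.1).isSome := by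
  induction ks using List.reverseRecOn with
  | nil => exact absurd rfl hne
  | append_singleton l k ih =>
    rcases eq_or_ne l [] with hl | hl
    · subst hl
      have hcont : (PySem.Dict.empty : PySem.Dict (List Char) Int).contains k = false := by
        rcases h : (PySem.Dict.empty : PySem.Dict (List Char) Int).contains k with _ | _
        · rfl
        · exact absurd ((PySem.Dict.contains_iff_mem_keys _ _).1 h)
            (by simp [PySem.Dict.keys_empty])
      have hres : ([] ++ [k]).foldl pvStepA (PySem.Dict.empty, none, 0) =
          (PySem.Dict.empty.insert k 1, some k, 1) := by
        simp [pvStepA, hcont]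
      rw [hres]
      refine ⟨?_, ?_, ?_, ⟨k, by simp, by simp⟩, ?_, rfl⟩
      · exact pv_getD_insert_count _ [] k 1
          (fun k' => by simp [PySem.Dict.getD_empty]) (by simp)
      · exact pv_mem_insert _ [] k 1
          (fun k' => by simp)
      · intro k' hk'
        simp only [List.nil_append, List.mem_singleton] at hk'
        subst hk'; simp
      · show some k = pvWinner 1 ([] ++ [k]) PySem.Dict.empty
        simp only [List.nil_append, pvWinner]
        rw [PySem.Dict.getD_modify]
        simp [PySem.Dict.getD_empty]
    · obtain ⟨hC, hM, hub, hex, hW, hS⟩ := ih hl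
      set st := l.foldl pvStepA (PySem.Dict.empty, none, 0) with hst
      have hfold : (l ++ [k]).foldl pvStepA (PySem.Dict.empty, none, 0) = pvStepA st k := by
        rw [List.foldl_append]; rfl
      obtain ⟨w, hw⟩ := Option.isSome_iff_exists.1 hS
      have hcnt_k : (((l ++ [k]).count k : Nat) : Int) = (l.count k : Int) + 1 := by
        push_cast [List.count_append]; simp
      have hcnt_ne : ∀ k', k' ≠ k → (((l ++ [k]).count k' : Nat) : Int) = (l.count k' : Int) := by
        intro k' hne'
        have hc : List.count k' (l ++ [k]) = List.count k' l := by
          simp [List.count_append, Ne.symm hne']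
        rw [hc]
      have hmem_of : ∀ k', k' ∈ l ++ [k] → k' ≠ k → k' ∈ l := by
        intro k' hk' hkne
        rcases List.mem_append.1 hk' with h | h
        · exact h
        · simp at h; exact absurd h hkne
      by_cases hmem : st.1.contains k = true
      · -- increment branch
        have hkin : k ∈ l := (hM k).1 hmem
        have hc1 : 1 ≤ (l.count k : Int) := by
          have := List.count_pos_iff.2 hkin; omega
        by_cases hgt : st.1.getD k 0 + 1 > st.2.2
        · have hres : (l ++ [k]).foldl pvStepA (PySem.Dict.empty, none, 0) =
              (st.1.insert k (st.1.getD k 0 + 1), some k, st.1.getD k 0 + 1) := by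
            rw [hfold]; simp [pvStepA, hmem, hgt]
          rw [hres]
          dsimp only
          refine ⟨?_, pv_mem_insert _ l k _ hM, ?_, ⟨k, by simp, ?_⟩, ?_, rfl⟩
          · exact pv_getD_insert_count _ l k _ hC (by rw [hC k])
          · intro k' hk'
            by_cases hk : k' = k
            · rw [hk, hcnt_k]
              have hCk := hC k
              omega
            · rw [hcnt_ne k' hk]
              have := hub k' (hmem_of k' hk' hk)
              have hCk := hC k
              omega
          · rw [hcnt_k, hC k]
          · -- no key of l attains the new maximum, so the appended key is the first to reach it
            have hnone : pvWinner (st.1.getD k 0 + 1) l PySem.Dict.empty = none := by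
              rcases h : pvWinner (st.1.getD k 0 + 1) l PySem.Dict.empty with _ | w'
              · rfl
              · exfalso
                have hle := pvWinner_le _ _ _ _ h
                rw [PySem.Dict.getD_empty] at hle
                have hwl : w' ∈ l := by
                  by_contra hnl
                  have h0 : l.count w' = 0 := List.count_eq_zero.2 hnl
                  rw [h0] at hle
                  simp at hle; omega
                have := hub w' hwl; omega
            show some k = pvWinner (st.1.getD k 0 + 1) (l ++ [k]) PySem.Dict.empty
            rw [pvWinner_append, hnone]
            simp only [pvWinner]
            rw [PySem.Dict.getD_modify]
            rw [PySem.Dict.getD_foldl_modify_add_one, PySem.Dict.getD_empty, hC k]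
            simp
        · have hres : (l ++ [k]).foldl pvStepA (PySem.Dict.empty, none, 0) =
              (st.1.insert k (st.1.getD k 0 + 1), st.2.1, st.2.2) := by
            rw [hfold]; simp [pvStepA, hmem, hgt]
          rw [hres]
          dsimp only
          obtain ⟨k₂, hk₂, hk₂e⟩ := hex
          have hCk := hC k
          have hk₂k : k₂ ≠ k := by
            intro h; rw [h] at hk₂e
            omega
          refine ⟨?_, pv_mem_insert _ l k _ hM, ?_, ⟨k₂, List.mem_append.2 (Or.inl hk₂), ?_⟩, ?_, hS⟩
          · exact pv_getD_insert_count _ l k _ hC (by rw [hC k])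
          · intro k' hk'
            by_cases hk : k' = k
            · rw [hk, hcnt_k]; omega
            · rw [hcnt_ne k' hk]
              exact hub k' (hmem_of k' hk' hk)
          · rw [hcnt_ne _ hk₂k]; exact hk₂e
          · show st.2.1 = pvWinner st.2.2 (l ++ [k]) PySem.Dict.empty
            rw [pvWinner_append, ← hW, hw]
      · -- new-key branch
        rw [Bool.not_eq_true] at hmem
        have hknl : k ∉ l := fun h => by rw [(hM k).2 h] at hmem; cases hmem
        have hcl0 : l.count k = 0 := List.count_eq_zero.2 hknl
        obtain ⟨k₂, hk₂, hk₂e⟩ := hex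
        have h1le : 1 ≤ st.2.2 := by
          have h1 : 1 ≤ l.count k₂ := List.count_pos_iff.2 hk₂
          omega
        have hres : (l ++ [k]).foldl pvStepA (PySem.Dict.empty, none, 0) =
            (st.1.insert k 1, some w, st.2.2) := by
          rw [hfold]; simp [pvStepA, hmem, hw]
        rw [hres]
        dsimp only
        have hk₂k : k₂ ≠ k := fun h => hknl (h ▸ hk₂)
        refine ⟨?_, pv_mem_insert _ l k _ hM, ?_, ⟨k₂, List.mem_append.2 (Or.inl hk₂), ?_⟩, ?_, rfl⟩
        · exact pv_getD_insert_count _ l k _ hC (by simp [hcl0])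
        · intro k' hk'
          by_cases hk : k' = k
          · rw [hk, hcnt_k]; omega
          · rw [hcnt_ne k' hk]
            exact hub k' (hmem_of k' hk' hk)
        · rw [hcnt_ne _ hk₂k]; exact hk₂e
        · show some w = pvWinner st.2.2 (l ++ [k]) PySem.Dict.empty
          rw [pvWinner_append, ← hW, hw]

-- B's m — max of the full count table's values — is exactly the maximal multiplicity
lemma pv_max_values (ks : List (List Char)) (m : Int)
    (hub : ∀ k ∈ ks, (ks.count k : Int) ≤ m) (hex : ∃ k ∈ ks, (ks.count k : Int) = m) :
    (PySem.List.max? (PySem.Dict.counter ks).values (fun v => v)).getD 0 = m := by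
  have hvals : (PySem.Dict.counter ks).values =
      (PySem.Set.ofList ks).map (fun k => ((ks.count k : Nat) : Int)) := by
    rw [PySem.Dict.values_eq_map_keys _ (PySem.Dict.nodup_keys_counter ks) 0,
      PySem.Dict.keys_counter]
    exact List.map_congr_left (fun k _ => PySem.Dict.getD_counter ks k)
  obtain ⟨k₂, hk₂, hk₂e⟩ := hex
  have hk₂s : k₂ ∈ PySem.Set.ofList ks := (PySem.Set.mem_ofList ks k₂).2 hk₂
  have hvne : (PySem.Dict.counter ks).values ≠ [] := by
    rw [hvals]
    intro h
    rw [List.map_eq_nil_iff] at h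
    rw [h] at hk₂s; simp at hk₂s
  rcases hmax : PySem.List.max? (PySem.Dict.counter ks).values (fun v => v) with _ | v
  · exact absurd ((PySem.List.max?_eq_none_iff _ _).1 hmax) hvne
  · have hvmem := PySem.List.max?_mem hmax
    rw [hvals] at hvmem
    obtain ⟨k₀, hk₀, hk₀e⟩ := List.mem_map.1 hvmem
    have hk₀ks : k₀ ∈ ks := (PySem.Set.mem_ofList ks k₀).1 hk₀
    have hvle : v ≤ m := by rw [← hk₀e]; exact hub k₀ hk₀ks
    have hmle : m ≤ v := by
      have : ((ks.count k₂ : Nat) : Int) ∈ (PySem.Dict.counter ks).values := by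
        rw [hvals]; exact List.mem_map.2 ⟨k₂, hk₂s, rfl⟩
      have := PySem.List.max?_isMax hmax _ this
      simpa [hk₂e] using this
    simp; omega

-- ===== VERDICT (by name: the statement is the Claim_ definition above) =====
theorem determine_center_plane_coordinate_new_spec : Claim_equal_determine_center_plane_coordinate_new := by
  intro chs cws indices ups _ hpre
  obtain ⟨h1, h2, hne, _⟩ := hpre
  unfold Spec_determine_center_plane_coordinate_new
  unfold determine_center_plane_coordinate_new determine_center_plane_coordinate_new_alt
  dsimp only
  -- the shared key list
  set keyf : Int → List Char := fun i =>
    PySem.Int.toChars (PySem.List.pyGetD chs (PySem.List.pyGetD indices i 0) 0 +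
      PySem.List.pyGetD ups (PySem.List.pyGetD indices i 0) 0)
      ++ '_' :: PySem.Int.toChars (PySem.List.pyGetD cws i 0) with hkeyf
  set ks : List (List Char) := (PySem.List.pyRange 0 (chs.length : Int)).map keyf with hks
  -- A's first loop builds the mapped list
  have hnew : (PySem.List.pyRange 0 (chs.length : Int)).foldl
      (fun acc i =>
        let idx := PySem.List.pyGetD indices i 0
        let left_up := PySem.List.pyGetD ups idx 0
        let ch := PySem.List.pyGetD chs idx 0
        acc ++ [ch + left_up]) [] =
      (PySem.List.pyRange 0 (chs.length : Int)).map
        (fun i => PySem.List.pyGetD chs (PySem.List.pyGetD indices i 0) 0 +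
          PySem.List.pyGetD ups (PySem.List.pyGetD indices i 0) 0) := by
    simpa using PySem.List.foldl_append_singleton_eq_map
      (fun i => PySem.List.pyGetD chs (PySem.List.pyGetD indices i 0) 0 +
        PySem.List.pyGetD ups (PySem.List.pyGetD indices i 0) 0)
      (PySem.List.pyRange 0 (chs.length : Int)) []
  rw [hnew]
  have hlen : ((PySem.List.pyRange 0 (chs.length : Int)).map
      (fun i => PySem.List.pyGetD chs (PySem.List.pyGetD indices i 0) 0 +
        PySem.List.pyGetD ups (PySem.List.pyGetD indices i 0) 0)).length = chs.length := by
    rw [List.length_map, PySem.List.pyRange_zero_natCast, List.length_map, List.length_range]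
  rw [hlen]
  -- A's counting loop is the fold of pvStepA over ks
  have hA : (PySem.List.pyRange 0 (chs.length : Int)).foldl
      (fun s i => pvStepA s
        (PySem.Int.toChars (PySem.List.pyGetD
            ((PySem.List.pyRange 0 (chs.length : Int)).map
              (fun i => PySem.List.pyGetD chs (PySem.List.pyGetD indices i 0) 0 +
                PySem.List.pyGetD ups (PySem.List.pyGetD indices i 0) 0)) i 0)
          ++ '_' :: PySem.Int.toChars (PySem.List.pyGetD cws i 0)))
      (PySem.Dict.empty, none, 0) = ks.foldl pvStepA (PySem.Dict.empty, none, 0) := by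
    rw [hks, List.foldl_map]
    apply PySem.List.foldl_congr_mem
    intro s i hi
    obtain ⟨hi0, hin⟩ := PySem.List.mem_pyRange_one.1 hi
    rw [PySem.List.pyGetD_map_pyRange_of_nonneg _ _ _ _ hi0 hin]
  rw [hA]
  -- B's combined loop splits into the key list and the counter
  have hB : (PySem.List.pyRange 0 (indices.length : Int)).foldl
      (fun (s : List (List Char) × PySem.Dict (List Char) Int) i =>
        let idx := PySem.List.pyGetD indices i 0
        let key := PySem.Int.toChars (PySem.List.pyGetD chs idx 0 + PySem.List.pyGetD ups idx 0)
          ++ '_' :: PySem.Int.toChars (PySem.List.pyGetD cws i 0)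
        (s.1 ++ [key], s.2.modify key 0 (· + 1)))
      ([], PySem.Dict.empty) = (ks, PySem.Dict.counter ks) := by
    have hind : (indices.length : Int) = (chs.length : Int) := by rw [h1, h2]
    rw [hind]
    show (PySem.List.pyRange 0 (chs.length : Int)).foldl
      (fun (s : List (List Char) × PySem.Dict (List Char) Int) i =>
        (s.1 ++ [keyf i], s.2.modify (keyf i) 0 (· + 1))) ([], PySem.Dict.empty) = _
    rw [PySem.List.foldl_prod_mk (fun a i => a ++ [keyf i])
      (fun (d : PySem.Dict (List Char) Int) i => d.modify (keyf i) 0 (· + 1))]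
    refine Prod.ext ?_ ?_
    · simpa using PySem.List.foldl_append_singleton_eq_map keyf
        (PySem.List.pyRange 0 (chs.length : Int)) []
    · rw [hks, PySem.Dict.counter_eq_foldl, List.foldl_map]
  rw [hB]
  -- ks is nonempty
  have hksne : ks ≠ [] := by
    rw [hks]
    intro h
    rw [List.map_eq_nil_iff, PySem.List.pyRange_zero_natCast, List.map_eq_nil_iff,
      List.range_eq_nil] at h
    exact hne (List.length_eq_zero_iff.1 h)
  obtain ⟨_, _, hub, hex, hW, _⟩ := pvA_inv ks hksne
  have hm := pv_max_values ks _ hub hex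
  rw [hm, ← hW]
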